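-- pv_equiv track=rewrite | github.com/carlos-ochoa/TT | utils/preprocessing/bajas.py | encontrar_periodos_cursados
-- ===== SOURCE A (Python) =====
-- def encontrar_periodos_cursados(trayectoria):
--     periodos = []
--     for periodo in trayectoria:
--         periodos.append(periodo)
--     periodos = sorted(periodos)
--     try:
--         del periodos[periodos.index('21/1')]
--     except:
--         pass
--     try:
--         del periodos[periodos.index('20/2')]
--     except:
--         pass
--     return periodos
-- ===== SOURCE B (Python) =====
-- def encontrar_periodos_cursados(trayectoria):
--     remaining = {'21/1': 1, '20/2': 1}
--     result = []
--     for p in sorted(trayectoria):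
--         if remaining.get(p, 0) > 0:
--             remaining[p] = remaining.get(p, 0) - 1
--         else:
--             result.append(p)
--     return result
-- ===== Notes on version B (the rewrite author's own statement) =====
-- stated objective: alternative
-- what changed: Replaces the two .index scans followed by del (each a separate pass over the sorted list) with a single budget-guided filtering pass: a dict maps each target value to a removal budget of 1 and the sorted list is copied once, skipping an element exactly when its budget is positive.
import Mathlib
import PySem

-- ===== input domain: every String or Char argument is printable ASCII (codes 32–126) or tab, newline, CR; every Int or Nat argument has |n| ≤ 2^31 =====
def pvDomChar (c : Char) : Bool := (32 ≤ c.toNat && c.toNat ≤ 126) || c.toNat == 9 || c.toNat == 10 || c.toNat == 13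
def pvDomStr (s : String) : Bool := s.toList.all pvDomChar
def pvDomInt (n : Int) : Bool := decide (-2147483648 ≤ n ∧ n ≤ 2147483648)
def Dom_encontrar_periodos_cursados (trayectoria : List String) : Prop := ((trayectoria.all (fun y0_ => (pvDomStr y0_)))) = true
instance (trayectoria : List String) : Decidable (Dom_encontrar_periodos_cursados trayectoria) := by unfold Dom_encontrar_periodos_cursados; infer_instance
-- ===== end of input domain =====

-- B replaces A's two .index/del scans over the sorted list with one budget-dict filtering pass (alternative decomposition, same cost).


-- ===== PORT A =====
-- try: del periodos[periodos.index(v)] except: pass   (index raises → none → list unchanged)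
def pvTryDel (periodos : List String) (v : String) : List String :=
  match PySem.List.index? periodos v with
  | some i =>
    match PySem.List.pop? periodos (i : Int) with
    | some r => r.2
    | none => periodos
  | none => periodos

def encontrar_periodos_cursados (trayectoria : List String) : List String :=
  let periodos := trayectoria.foldl (fun acc periodo => acc ++ [periodo]) []
  let periodos := PySem.List.sorted periodos (fun x => x) false
  let periodos := pvTryDel periodos "21/1"
  let periodos := pvTryDel periodos "20/2"
  periodos

-- ===== PORT B =====
def pvBLoop (l : List String) (result : List String) (remaining : PySem.Dict String Int) : List String :=
  match l with
  | [] => result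
  | p :: rest =>
    if remaining.getD p 0 > 0 then
      pvBLoop rest result (remaining.insert p (remaining.getD p 0 - 1))
    else
      pvBLoop rest (result ++ [p]) remaining

def encontrar_periodos_cursados_alt (trayectoria : List String) : List String :=
  pvBLoop (PySem.List.sorted trayectoria (fun x => x) false) []
    (PySem.Dict.ofList [("21/1", (1 : Int)), ("20/2", (1 : Int))])

-- ===== PRECONDITION & SPEC =====
def Spec_encontrar_periodos_cursados (trayectoria : List String) (out : List String) : Prop := out = encontrar_periodos_cursados_alt trayectoria
instance (trayectoria : List String) (out : List String) : Decidable (Spec_encontrar_periodos_cursados trayectoria out) := by unfold Spec_encontrar_periodos_cursados; infer_instance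

-- ===== CLAIM (what is proved, stated in full; the proofs are below) =====
def Claim_equal_encontrar_periodos_cursados : Prop := ∀ (trayectoria : List String), Dom_encontrar_periodos_cursados trayectoria → Spec_encontrar_periodos_cursados trayectoria (encontrar_periodos_cursados trayectoria)

-- ===== LEMMAS AND PROOFS =====

-- first-occurrence erase (reference form both sides are reduced to)
def eraseF (x : String) : List String → List String
  | [] => []
  | y :: t => if y = x then t else y :: eraseF x t

theorem eraseF_of_not_mem (x : String) (l : List String) (h : x ∉ l) : eraseF x l = l := by
  induction l with
  | nil => rfl
  | cons y t ih =>
    simp only [List.mem_cons, not_or] at h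
    simp [eraseF, Ne.symm h.1, ih h.2]

theorem eraseF_append_of_not_mem (x : String) (pre suf : List String) (h : x ∉ pre) :
    eraseF x (pre ++ x :: suf) = pre ++ suf := by
  induction pre with
  | nil => simp [eraseF]
  | cons y t ih =>
    simp only [List.mem_cons, not_or] at h
    simp [eraseF, Ne.symm h.1, ih h.2]

theorem pvTryDel_eq_eraseF (l : List String) (v : String) : pvTryDel l v = eraseF v l := by
  unfold pvTryDel
  cases hidx : PySem.List.index? l v with
  | none =>
    rw [eraseF_of_not_mem v l (by rwa [← PySem.List.index?_eq_none_iff (v := v)])]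
  | some i =>
    obtain ⟨pre, suf, hl, hlen, hpre⟩ := (PySem.List.index?_eq_some_iff l v i).1 hidx
    subst hl
    have hi : i < (pre ++ v :: suf).length := by
      simp [← hlen]
    simp only [PySem.List.pop?_natCast _ _ hi]
    rw [eraseF_append_of_not_mem v pre suf hpre, ← hlen,
      List.eraseIdx_append_of_length_le (le_refl pre.length)]
    simp

def condErase (x : String) (b : Bool) (l : List String) : List String :=
  if b then eraseF x l else l

-- the budget-pass result, abstracted to two boolean budgets
def gPass : List String → Bool → Bool → List String
  | [], _, _ => []
  | p :: rest, b1, b2 =>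
    if p = "21/1" then
      (if b1 then gPass rest false b2 else p :: gPass rest b1 b2)
    else if p = "20/2" then
      (if b2 then gPass rest b1 false else p :: gPass rest b1 b2)
    else p :: gPass rest b1 b2

theorem pvBLoop_eq_gPass (l : List String) : ∀ (res : List String) (d : PySem.Dict String Int),
    (∀ p, p ≠ "21/1" → p ≠ "20/2" → ¬ d.getD p 0 > 0) → d.getD "21/1" 0 ≤ 1 → d.getD "20/2" 0 ≤ 1 →
    pvBLoop l res d = res ++ gPass l (decide (d.getD "21/1" 0 > 0)) (decide (d.getD "20/2" 0 > 0)) := by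
  induction l with
  | nil => intro res d _ _ _; simp [pvBLoop, gPass]
  | cons p rest ih =>
    intro res d hd hle1 hle2
    by_cases h1 : p = "21/1"
    · subst h1
      by_cases hb : d.getD "21/1" 0 > 0
      · simp only [pvBLoop, if_pos hb]
        rw [ih _ _ (by
          intro q hq1 hq2
          rw [PySem.Dict.getD_insert]
          simp only [if_neg hq1]
          exact hd q hq1 hq2)
          (by rw [PySem.Dict.getD_insert]; simp; omega)
          (by rw [PySem.Dict.getD_insert]; simp [(by decide : ¬ ("20/2" : String) = "21/1")]; exact hle2)]
        rw [PySem.Dict.getD_insert, PySem.Dict.getD_insert]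
        have : ¬ ((if ("21/1" : String) = "21/1" then d.getD "21/1" 0 - 1 else d.getD "21/1" 0) > 0) := by
          simp; omega
        simp only [decide_eq_false this, if_neg (by decide : ¬ ("20/2" : String) = "21/1")]
        simp only [gPass, if_pos rfl, decide_eq_true hb, if_pos rfl]
        have h0 : decide (1 < d.getD "21/1" 0) = false := by simp; omega
        simp [h0]
      · simp only [pvBLoop, if_neg hb]
        rw [ih _ _ hd hle1 hle2]
        simp [gPass, hb]
    · by_cases h2 : p = "20/2"
      · subst h2
        by_cases hb : d.getD "20/2" 0 > 0
        · simp only [pvBLoop, if_pos hb]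
          rw [ih _ _ (by
            intro q hq1 hq2
            rw [PySem.Dict.getD_insert]
            simp only [if_neg hq2]
            exact hd q hq1 hq2)
            (by rw [PySem.Dict.getD_insert]; simp [(by decide : ¬ ("21/1" : String) = "20/2")]; exact hle1)
            (by rw [PySem.Dict.getD_insert]; simp; omega)]
          rw [PySem.Dict.getD_insert, PySem.Dict.getD_insert]
          have : ¬ ((if ("20/2" : String) = "20/2" then d.getD "20/2" 0 - 1 else d.getD "20/2" 0) > 0) := by
            simp; omega
          simp only [decide_eq_false this, if_neg (by decide : ¬ ("21/1" : String) = "20/2")]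
          simp only [gPass, if_neg (by decide : ¬ ("20/2" : String) = "21/1"), if_pos rfl,
            decide_eq_true hb, if_pos rfl]
          have h0 : decide (1 < d.getD "20/2" 0) = false := by simp; omega
          simp [h0]
        · simp only [pvBLoop, if_neg hb]
          rw [ih _ _ hd hle1 hle2]
          simp [gPass, hb]
      · have hb : ¬ d.getD p 0 > 0 := hd p h1 h2
        simp only [pvBLoop, if_neg hb]
        rw [ih _ _ hd hle1 hle2]
        simp [gPass, h1, h2]

theorem gPass_eq_condErase (l : List String) : ∀ (b1 b2 : Bool),
    gPass l b1 b2 = condErase "20/2" b2 (condErase "21/1" b1 l) := by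
  induction l with
  | nil => intro b1 b2; cases b1 <;> cases b2 <;> simp [gPass, condErase, eraseF]
  | cons p rest ih =>
    intro b1 b2
    by_cases h1 : p = "21/1"
    · subst h1
      cases b1 with
      | true =>
        simp only [gPass, if_pos rfl, if_pos rfl]
        rw [ih]
        cases b2 <;> simp [condErase, eraseF]
      | false =>
        simp only [gPass, if_pos rfl, if_neg (by decide : ¬ (true = false))]
        rw [ih]
        cases b2 <;> simp [condErase, eraseF]
    · by_cases h2 : p = "20/2"
      · subst h2
        cases b2 with
        | true =>
          simp only [gPass, if_neg (by decide : ¬ ("20/2" : String) = "21/1"), if_pos rfl, if_pos rfl]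
          rw [ih]
          cases b1 <;> simp [condErase, eraseF]
        | false =>
          simp only [gPass, if_neg (by decide : ¬ ("20/2" : String) = "21/1"), if_pos rfl,
            if_neg (by decide : ¬ (true = false))]
          rw [ih]
          cases b1 <;> simp [condErase, eraseF]
      · simp only [gPass, if_neg h1, if_neg h2]
        rw [ih]
        cases b1 <;> cases b2 <;> simp [condErase, eraseF, h1, h2]

theorem foldl_append_id (l : List String) : l.foldl (fun acc p => acc ++ [p]) [] = l := by
  have h : ∀ (l acc : List String), l.foldl (fun acc p => acc ++ [p]) acc = acc ++ l := by
    intro l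
    induction l with
    | nil => simp
    | cons p rest ih => intro acc; simp [List.foldl, ih]
  simpa using h l []

-- ===== VERDICT (by name: the statement is the Claim_ definition above) =====
theorem encontrar_periodos_cursados_spec : Claim_equal_encontrar_periodos_cursados := by
  intro trayectoria _
  unfold Spec_encontrar_periodos_cursados encontrar_periodos_cursados encontrar_periodos_cursados_alt
  rw [foldl_append_id]
  rw [pvBLoop_eq_gPass _ _ _ (by
    intro p h1 h2
    have : (PySem.Dict.ofList [("21/1", (1 : Int)), ("20/2", (1 : Int))]).getD p 0 = 0 := by
      show (((PySem.Dict.empty.insert "21/1" 1).insert "20/2" (1 : Int))).getD p 0 = 0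
      rw [PySem.Dict.getD_insert, PySem.Dict.getD_insert]
      simp [h1, h2]
    omega) (by decide) (by decide)]
  have hb1 : decide ((PySem.Dict.ofList [("21/1", (1 : Int)), ("20/2", (1 : Int))]).getD "21/1" 0 > 0) = true := by decide
  have hb2 : decide ((PySem.Dict.ofList [("21/1", (1 : Int)), ("20/2", (1 : Int))]).getD "20/2" 0 > 0) = true := by decide
  rw [hb1, hb2, gPass_eq_condErase]
  simp [condErase, pvTryDel_eq_eraseF]
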